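-- pv_equiv track=rewrite | github.com/brasqo/itp-w1-create-box | create_box/main.py | empty_box
-- ===== SOURCE A (Python) =====
-- def empty_box(height, width, character):
--     if height < 1:
--         return 'Height is less than 1'
--     if width < 1:
--         return 'Width is less than 1'
--     if not isinstance (character, str):
--         return 'Character is not a string'
--
--     mybox = ''
--     for i in range(height):
--         charizard = ''
--         for j in range(width):
--             # Only add character if its at the end points
--             if i == 0 or j == 0 or i == (height - 1) or j == (width - 1):
--                 charizard += character
--             else:
--                 charizard += ' '
--         mybox += charizard
--         mybox += '\n'
--
--     return mybox
-- ===== SOURCE B (Python) =====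
-- def empty_box(height, width, character):
--     if height < 1:
--         return 'Height is less than 1'
--     if width < 1:
--         return 'Width is less than 1'
--     if not isinstance(character, str):
--         return 'Character is not a string'
--
--     full = character * width
--     interior = full if width == 1 else character + ' ' * (width - 2) + character
--     return ''.join((full if i == 0 or i == height - 1 else interior) + '\n'
--                    for i in range(height))
-- ===== Notes on version B (the rewrite author's own statement) =====
-- stated objective: simpler
-- what changed: Replaced the character-by-character nested loops with whole-row construction: border rows are character*width, interior rows are character + spaces + character (width==1 rows are all border), joined in one pass.
import Mathlib
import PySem

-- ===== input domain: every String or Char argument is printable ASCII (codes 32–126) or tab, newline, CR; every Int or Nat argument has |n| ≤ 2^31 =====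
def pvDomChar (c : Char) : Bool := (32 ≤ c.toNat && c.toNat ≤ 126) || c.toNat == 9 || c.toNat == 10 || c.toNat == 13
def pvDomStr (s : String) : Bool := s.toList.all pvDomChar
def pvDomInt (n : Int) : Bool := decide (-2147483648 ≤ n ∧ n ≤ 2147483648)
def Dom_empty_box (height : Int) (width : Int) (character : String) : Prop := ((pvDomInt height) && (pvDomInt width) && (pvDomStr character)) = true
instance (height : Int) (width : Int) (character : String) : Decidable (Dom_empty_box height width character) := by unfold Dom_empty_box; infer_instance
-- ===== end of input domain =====

-- B builds the box row by row (whole border/interior rows) instead of A's character-by-character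
-- nested loops; objective: simpler. Equal return value on all inputs (A is total).

-- ===== PORT A =====
-- inner loop of A: charizard built character by character over range(width)
def emptyBoxRowA (height : Int) (width : Int) (character : String) (i : Int) : String :=
  (PySem.List.pyRange 0 width 1).foldl
    (fun charizard j =>
      if i == 0 || j == 0 || i == height - 1 || j == width - 1
      then charizard ++ character
      else charizard ++ " ") ""

def empty_box (height : Int) (width : Int) (character : String) : String :=
  if height < 1 then "Height is less than 1"
  else if width < 1 then "Width is less than 1"
  else
    -- the `isinstance(character, str)` guard is vacuous here: character : String always
    (PySem.List.pyRange 0 height 1).foldl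
      (fun mybox i => mybox ++ emptyBoxRowA height width character i ++ "\n") ""

-- ===== PORT B =====
-- character * n  (Python string repetition)
def strTimes (s : String) (n : Int) : String :=
  String.ofList (PySem.List.pyRepeat s.toList n)

def empty_box_alt (height : Int) (width : Int) (character : String) : String :=
  if height < 1 then "Height is less than 1"
  else if width < 1 then "Width is less than 1"
  else
    let full := strTimes character width
    let interior :=
      if width == 1 then full
      else character ++ strTimes " " (width - 2) ++ character
    PySem.Str.join ""
      ((PySem.List.pyRange 0 height 1).map
        (fun i => (if i == 0 || i == height - 1 then full else interior) ++ "\n"))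

-- ===== PRECONDITION & SPEC =====
def Spec_empty_box (height : Int) (width : Int) (character : String) (out : String) : Prop := out = empty_box_alt height width character
instance (height : Int) (width : Int) (character : String) (out : String) : Decidable (Spec_empty_box height width character out) := by unfold Spec_empty_box; infer_instance

-- ===== CLAIM (what is proved, stated in full; the proofs are below) =====
def Claim_equal_empty_box : Prop := ∀ (height : Int) (width : Int) (character : String), Dom_empty_box height width character → Spec_empty_box height width character (empty_box height width character)

-- ===== LEMMAS AND PROOFS =====

-- a foldl that appends g x at each step, seen as characters
theorem foldl_append_toList {α : Type} (l : List α) (g : α → String) (init : String) :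
    (l.foldl (fun s x => s ++ g x) init).toList
      = init.toList ++ l.flatMap (fun x => (g x).toList) := by
  induction l generalizing init with
  | nil => simp
  | cons a t ih => simp [ih, String.toList_append]

-- a flatMap of a constant is a flatten of replicates
theorem flatMap_const {α β : Type} (l : List α) (cs : List β) :
    l.flatMap (fun _ => cs) = (List.replicate l.length cs).flatten := by
  induction l with
  | nil => simp
  | cons a t ih => simp [ih, List.replicate_succ]

-- A's inner loop, seen as characters
theorem rowA_toList (height width : Int) (character : String) (i : Int) :
    (emptyBoxRowA height width character i).toList
      = (PySem.List.pyRange 0 width 1).flatMap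
          (fun j => if i == 0 || j == 0 || i == height - 1 || j == width - 1
                    then character.toList else [' ']) := by
  unfold emptyBoxRowA
  have h1 : ∀ (s : String) (j : Int),
      (if i == 0 || j == 0 || i == height - 1 || j == width - 1
       then s ++ character else s ++ " ")
      = s ++ (if i == 0 || j == 0 || i == height - 1 || j == width - 1
              then character else " ") := by
    intro s j; split <;> rfl
  simp only [h1]
  rw [foldl_append_toList]
  simp only [String.toList_empty, List.nil_append]
  apply List.flatMap_congr
  intro j _
  split <;> simp

-- a full border row of A equals character * width, as characters
theorem rowA_border (height width : Int) (character : String) (i : Int)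
    (hb : (i == 0 || i == height - 1) = true) :
    (emptyBoxRowA height width character i).toList
      = (strTimes character width).toList := by
  rw [rowA_toList]
  have hcond : ∀ j : Int,
      (i == 0 || j == 0 || i == height - 1 || j == width - 1) = true := by
    intro j
    rcases Bool.or_eq_true_iff.mp hb with h | h <;> simp [h]
  calc (PySem.List.pyRange 0 width 1).flatMap
        (fun j => if i == 0 || j == 0 || i == height - 1 || j == width - 1
                  then character.toList else [' '])
      = (PySem.List.pyRange 0 width 1).flatMap (fun _ => character.toList) := by
        apply List.flatMap_congr; intro j _; rw [hcond j]; simp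
    _ = (strTimes character width).toList := by
        rw [flatMap_const]
        simp [strTimes, PySem.List.pyRepeat, PySem.List.length_pyRange_one]

-- an interior row of A (i not a border row, width ≥ 2)
theorem rowA_interior (height width : Int) (character : String) (i : Int)
    (hw : 2 ≤ width) (hi0 : ¬ i = 0) (hih : ¬ i = height - 1) :
    (emptyBoxRowA height width character i).toList
      = character.toList
        ++ (strTimes " " (width - 2)).toList
        ++ character.toList := by
  rw [rowA_toList]
  have hsplit1 : PySem.List.pyRange 0 width 1
      = PySem.List.pyRange 0 1 1 ++ PySem.List.pyRange 1 width 1 :=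
    PySem.List.pyRange_one_append 0 1 width (by omega) (by omega)
  have hsplit2 : PySem.List.pyRange 1 width 1
      = PySem.List.pyRange 1 (width - 1) 1 ++ PySem.List.pyRange (width - 1) width 1 :=
    PySem.List.pyRange_one_append 1 (width - 1) width (by omega) (by omega)
  have h01 : PySem.List.pyRange 0 1 1 = [0] := PySem.List.pyRange_one_singleton 0
  have hlast : PySem.List.pyRange (width - 1) width 1 = [width - 1] := by
    have := PySem.List.pyRange_one_singleton (width - 1)
    simpa [show width - 1 + 1 = width by omega] using this
  rw [hsplit1, hsplit2, h01, hlast]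
  simp only [List.flatMap_append, List.flatMap_cons, List.flatMap_nil, List.append_nil]
  have c0 : (i == 0 || (0:Int) == 0 || i == height - 1 || (0:Int) == width - 1) = true := by
    simp
  have cl : (i == 0 || width - 1 == 0 || i == height - 1 || width - 1 == width - 1) = true := by
    simp
  rw [c0, cl]
  simp only [if_true]
  have hmid : (PySem.List.pyRange 1 (width - 1) 1).flatMap
      (fun j => if i == 0 || j == 0 || i == height - 1 || j == width - 1
                then character.toList else [' '])
      = (strTimes " " (width - 2)).toList := by
    have hmem : ∀ j ∈ PySem.List.pyRange 1 (width - 1) 1,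
        (if i == 0 || j == 0 || i == height - 1 || j == width - 1
         then character.toList else [' ']) = [' '] := by
      intro j hj
      rw [PySem.List.mem_pyRange_one] at hj
      have hj0 : ¬ j = 0 := by omega
      have hjl : ¬ j = width - 1 := by omega
      simp [hi0, hih, hj0, hjl]
    rw [List.flatMap_congr hmem, flatMap_const]
    simp [strTimes, PySem.List.pyRepeat, PySem.List.length_pyRange_one,
      List.flatten_replicate_singleton]
    omega
  rw [hmid]
  simp [List.append_assoc]

-- interior rows agree with B's interior formula also when width = 1 (every cell is border)
theorem rowA_eq_rowB (height width : Int) (character : String) (i : Int) (hw : 1 ≤ width) :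
    (emptyBoxRowA height width character i).toList
      = (if i == 0 || i == height - 1
         then strTimes character width
         else if width == 1 then strTimes character width
              else character ++ strTimes " " (width - 2) ++ character).toList := by
  by_cases hb : (i == 0 || i == height - 1) = true
  · rw [if_pos hb]; exact rowA_border height width character i hb
  · rw [if_neg (by simp_all)]
    have hi0 : ¬ i = 0 := by
      intro h; apply hb; simp [h]
    have hih : ¬ i = height - 1 := by
      intro h; apply hb; simp [h]
    by_cases hw1 : width = 1
    · subst hw1
      rw [if_pos (by simp)]
      rw [rowA_toList]
      have h01 : PySem.List.pyRange 0 1 1 = [0] := PySem.List.pyRange_one_singleton 0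
      rw [h01]
      simp [strTimes, PySem.List.pyRepeat, List.replicate_succ]
    · rw [if_neg (by simp [hw1])]
      rw [rowA_interior height width character i (by omega) hi0 hih]
      simp [String.toList_append]

-- ''.join(...) with empty separator, as characters
theorem intercalate_nil_chars (ls : List (List Char)) :
    List.intercalate ([] : List Char) ls = ls.flatten := by
  induction ls with
  | nil => simp [List.intercalate]
  | cons a t ih =>
    cases t with
    | nil => simp [List.intercalate]
    | cons b t' =>
      simp [List.intercalate] at ih ⊢
      simpa using ih

theorem join_empty_toList (parts : List String) :
    (PySem.Str.join "" parts).toList = parts.flatMap String.toList := by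
  simp [PySem.Str.join, PySem.Chars.join, intercalate_nil_chars, List.flatten_eq_flatMap,
    List.flatMap_map]

-- the outer loop of A appends row ++ "\n" at each step
theorem foldl_append2_toList {α : Type} (l : List α) (g h : α → String) (init : String) :
    (l.foldl (fun s x => s ++ g x ++ h x) init).toList
      = init.toList ++ l.flatMap (fun x => (g x).toList ++ (h x).toList) := by
  induction l generalizing init with
  | nil => simp
  | cons a t ih => simp [ih, String.toList_append]

-- ===== VERDICT (by name: the statement is the Claim_ definition above) =====
theorem empty_box_spec : Claim_equal_empty_box := by
  intro height width character _
  unfold Spec_empty_box empty_box empty_box_alt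
  by_cases hh : height < 1
  · simp [hh]
  · by_cases hw : width < 1
    · simp [hh, hw]
    · have hW : (1:Int) ≤ width := by omega
      simp only [if_neg hh, if_neg hw]
      rw [← String.toList_inj, foldl_append2_toList, join_empty_toList]
      simp only [String.toList_empty, List.nil_append, List.flatMap_map]
      apply List.flatMap_congr
      intro i _
      rw [String.toList_append]
      congr 1
      exact rowA_eq_rowB height width character i hW
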